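-- pv_equiv track=rewrite | github.com/han9369/star-api | synastry_service/nakshatra.py | determine_relationship_type
-- ===== SOURCE A (Python) =====
-- def determine_relationship_type(interval):
--     """
--     根据星宿间隔确定关系类型
--     关系类型基于印度占星传统，且按照特定间隔值分类:
--     - MAITRI (命之星): 同一星宿 (间隔=0或27)
--     - KARMA (业胎): 间隔=1、10、19
--     - ADHI (安坏): 间隔=3、12、21或6、15、24
--     - VAIRI (危成): 间隔=8、17、26或5、14、23
--     - MITRA (友衰): 间隔=1、10、19或4、13、22
--     - SAHAJ (荣亲): 间隔=2、11、20或9、18、27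
--     """
--     # 标准关系类型及其对应的间隔值
--     standard_intervals = {
--         "MAITRI": [0, 27],                     # 命之星(同一星宿)
--         "KARMA": [1, 10, 19],                  # 业胎
--         "ADHI": [3, 12, 21, 6, 15, 24],        # 安坏
--         "VAIRI": [8, 17, 26, 5, 14, 23],       # 危成
--         "MITRA": [1, 10, 19, 4, 13, 22],       # 友衰
--         "SAHAJ": [2, 11, 20, 9, 18, 27]        # 荣亲
--     }
--
--     # 直接检查间隔是否在各关系类型的标准间隔中
--     for rel_type, intervals in standard_intervals.items():
--         if interval in intervals:
--             return rel_type
--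
--     # 如果不是标准间隔，计算与各标准间隔的差距，选择最接近的
--     min_diff = float('inf')
--     closest_type = "MAITRI"  # 默认值
--
--     for rel_type, intervals in standard_intervals.items():
--         for std_interval in intervals:
--             diff = abs(interval - std_interval)
--             if diff < min_diff:
--                 min_diff = diff
--                 closest_type = rel_type
--
--     return closest_type
-- ===== SOURCE B (Python) =====
-- # Table-driven: one flat lookup table for 0..27 (nearest-match ties resolved once,
-- # by the same declaration-order rule), everything out of range is closest to 0 or 27 -> MAITRI.
-- _TABLE = [
--     "MAITRI", "KARMA", "SAHAJ", "ADHI", "MITRA", "VAIRI", "ADHI",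
--     "ADHI", "VAIRI", "SAHAJ", "KARMA", "SAHAJ", "ADHI", "MITRA",
--     "VAIRI", "ADHI", "ADHI", "VAIRI", "SAHAJ", "KARMA", "SAHAJ",
--     "ADHI", "MITRA", "VAIRI", "ADHI", "ADHI", "VAIRI", "MAITRI",
-- ]
--
-- def determine_relationship_type(interval):
--     if interval < 0 or interval > 27:
--         return "MAITRI"
--     return _TABLE[interval]
-- ===== Notes on version B (the rewrite author's own statement) =====
-- stated objective: simpler
-- what changed: Replaces the dict scan plus nested nearest-interval minimization loop by a single precomputed lookup table indexed by the interval (ties pre-resolved in declaration order), with every out-of-range interval mapped to MAITRI, the provably nearest type.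
import Mathlib
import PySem

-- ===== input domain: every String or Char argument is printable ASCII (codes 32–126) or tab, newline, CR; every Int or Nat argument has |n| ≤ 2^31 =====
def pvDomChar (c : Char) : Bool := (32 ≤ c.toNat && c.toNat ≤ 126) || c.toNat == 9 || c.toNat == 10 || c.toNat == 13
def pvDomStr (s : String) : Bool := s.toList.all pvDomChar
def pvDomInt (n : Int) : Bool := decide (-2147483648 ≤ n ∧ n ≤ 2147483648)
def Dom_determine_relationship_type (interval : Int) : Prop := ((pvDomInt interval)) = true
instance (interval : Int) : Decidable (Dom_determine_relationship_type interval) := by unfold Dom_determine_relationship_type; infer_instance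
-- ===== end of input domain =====

-- B replaces A's dict scans and nearest-match fold by one precomputed 0..27 lookup table (simpler, O(1)).


-- ===== PORT A =====
def stdIntervalsA : List (String × List Int) :=
  [("MAITRI", [0, 27]),
   ("KARMA", [1, 10, 19]),
   ("ADHI", [3, 12, 21, 6, 15, 24]),
   ("VAIRI", [8, 17, 26, 5, 14, 23]),
   ("MITRA", [1, 10, 19, 4, 13, 22]),
   ("SAHAJ", [2, 11, 20, 9, 18, 27])]

-- first loop: first rel_type whose interval list contains `interval`
def findExactA (interval : Int) : List (String × List Int) → Option String
  | [] => none
  | (t, l) :: rest => if l.contains interval then some t else findExactA interval rest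

-- `diff < min_diff`, with `none` playing float('inf')
def ltInfA (d : Nat) : Option Nat → Bool
  | none => true
  | some m => d < m

-- inner loop `for std_interval in intervals`, state = (min_diff, closest_type)
def innerA (interval : Int) (t : String) (st : Option Nat × String) : List Int → Option Nat × String
  | [] => st
  | s :: rest =>
      innerA interval t
        (if ltInfA (interval - s).natAbs st.1 then (some (interval - s).natAbs, t) else st) rest

-- outer loop `for rel_type, intervals in standard_intervals.items()`
def outerA (interval : Int) (st : Option Nat × String) : List (String × List Int) → Option Nat × String
  | [] => st
  | p :: rest => outerA interval (innerA interval p.1 st p.2) rest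

def determine_relationship_type (interval : Int) : String :=
  match findExactA interval stdIntervalsA with
  | some t => t
  | none => (outerA interval (none, "MAITRI") stdIntervalsA).2

-- ===== PORT B =====
def relTableB : List String :=
  ["MAITRI", "KARMA", "SAHAJ", "ADHI", "MITRA", "VAIRI", "ADHI",
   "ADHI", "VAIRI", "SAHAJ", "KARMA", "SAHAJ", "ADHI", "MITRA",
   "VAIRI", "ADHI", "ADHI", "VAIRI", "SAHAJ", "KARMA", "SAHAJ",
   "ADHI", "MITRA", "VAIRI", "ADHI", "ADHI", "VAIRI", "MAITRI"]

def determine_relationship_type_alt (interval : Int) : String :=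
  if interval < 0 || interval > 27 then "MAITRI"
  else (PySem.List.pyGet? relTableB interval).getD ""  -- index provably in range; getD is a totality guard only

-- ===== PRECONDITION & SPEC =====
def Spec_determine_relationship_type (interval : Int) (out : String) : Prop := out = determine_relationship_type_alt interval
instance (interval : Int) (out : String) : Decidable (Spec_determine_relationship_type interval out) := by unfold Spec_determine_relationship_type; infer_instance

-- ===== CLAIM (what is proved, stated in full; the proofs are below) =====
def Claim_equal_determine_relationship_type : Prop := ∀ (interval : Int), Dom_determine_relationship_type interval → Spec_determine_relationship_type interval (determine_relationship_type interval)

-- ===== LEMMAS AND PROOFS =====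
lemma inner_stay (i : Int) (t : String) (m : Nat) (c : String) (l : List Int)
    (h : ∀ s ∈ l, m ≤ (i - s).natAbs) : innerA i t (some m, c) l = (some m, c) := by
  induction l with
  | nil => rfl
  | cons s rest ih =>
      have hm := h s (List.mem_cons_self ..)
      simp only [innerA, ltInfA]
      rw [if_neg (by simpa using Nat.not_lt.mpr hm)]
      exact ih (fun x hx => h x (List.mem_cons_of_mem _ hx))

lemma outer_stay (i : Int) (m : Nat) (c : String) (ps : List (String × List Int))
    (h : ∀ p ∈ ps, ∀ s ∈ p.2, m ≤ (i - s).natAbs) : outerA i (some m, c) ps = (some m, c) := by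
  induction ps with
  | nil => rfl
  | cons p rest ih =>
      simp only [outerA]
      rw [inner_stay i p.1 m c p.2 (h p (List.mem_cons_self ..))]
      exact ih (fun q hq => h q (List.mem_cons_of_mem _ hq))

lemma findExact_none (i : Int) (h : i < 0 ∨ 27 < i) : findExactA i stdIntervalsA = none := by
  simp only [stdIntervalsA, findExactA, List.contains_eq_mem, List.mem_cons, List.not_mem_nil]
  split_ifs <;> simp_all <;> omega

lemma outer_cons (i : Int) (st : Option Nat × String) (p : String × List Int)
    (rest : List (String × List Int)) :
    outerA i st (p :: rest) = outerA i (innerA i p.1 st p.2) rest := rfl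

lemma inner_cons (i : Int) (t : String) (st : Option Nat × String) (s : Int) (rest : List Int) :
    innerA i t st (s :: rest) =
      innerA i t (if ltInfA (i - s).natAbs st.1 then (some (i - s).natAbs, t) else st) rest := rfl

lemma first_pair_neg (i : Int) (h : i < 0) :
    innerA i "MAITRI" (none, "MAITRI") [0, 27] = (some (i - 0).natAbs, "MAITRI") := by
  rw [inner_cons, if_pos (by simp [ltInfA]), inner_cons,
    if_neg (by simp only [ltInfA, decide_eq_true_eq]; omega)]
  rfl

lemma first_pair_big (i : Int) (h : 27 < i) :
    innerA i "MAITRI" (none, "MAITRI") [0, 27] = (some (i - 27).natAbs, "MAITRI") := by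
  rw [inner_cons, if_pos (by simp [ltInfA]), inner_cons,
    if_pos (by simp only [ltInfA, decide_eq_true_eq]; omega)]
  rfl

lemma A_out_of_range (i : Int) (h : i < 0 ∨ 27 < i) : determine_relationship_type i = "MAITRI" := by
  unfold determine_relationship_type
  rw [findExact_none i h]
  show (outerA i (none, "MAITRI") stdIntervalsA).2 = "MAITRI"
  simp only [stdIntervalsA]
  rw [outer_cons]
  rcases h with h | h
  · rw [first_pair_neg i h,
      outer_stay i _ _ _ (by intro p hp s hs; fin_cases hp <;> fin_cases hs <;> omega)]
  · rw [first_pair_big i h,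
      outer_stay i _ _ _ (by intro p hp s hs; fin_cases hp <;> fin_cases hs <;> omega)]

lemma B_out_of_range (i : Int) (h : i < 0 ∨ 27 < i) : determine_relationship_type_alt i = "MAITRI" := by
  simp only [determine_relationship_type_alt]
  rw [if_pos]; simp; omega

-- ===== VERDICT (by name: the statement is the Claim_ definition above) =====
theorem determine_relationship_type_spec : Claim_equal_determine_relationship_type := by
  intro i _
  show determine_relationship_type i = determine_relationship_type_alt i
  by_cases h : 0 ≤ i ∧ i ≤ 27
  · obtain ⟨h1, h2⟩ := h; interval_cases i <;> decide
  · rw [A_out_of_range i (by omega), B_out_of_range i (by omega)]
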